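-- pv_equiv track=rewrite | github.com/feruzali/smart_mobility_labs | Midterm/fleet_action_py/fleet_action_py/fleet_management_server_cli.py | simple_route_generation
-- ===== SOURCE A (Python) =====
-- def simple_route_generation(fleet_size):
--     task_locations = ['Seoul', 'Busan', 'Incheon', 'Daegu', 'Daejeon', 'Gwangju', 'Ulsan', 'Suwon', 'Changwon', 'Seongnam', 'Goyang', 'Anyang', 'Yongin', 'Jeonju', 'Cheongju', 'Chuncheon', 'Gangneung', 'Jeju', 'Gimpo', 'Pohang', 'Ansan', 'Wonju', 'Guri', 'Gimhae', 'Yangju', 'Bucheon', 'Asan', 'Gunsan', 'Gyeongju', 'Iksan', 'Mokpo', 'Suncheon', 'Yeosu', 'Jecheon', 'Hwaseong', 'Gwangmyeong', 'Pyeongtaek', 'Uijeongbu', 'Cheonan', 'Andong', 'Gimcheon', 'Gyeongsan', 'Pocheon', 'Gwacheon', 'Naju', 'Gimje', 'Miryang', 'Hwado']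
--
--     routes = {}
--     num_tasks = len(task_locations)
--
--     for i in range(fleet_size):
--         routes[f'Vehicle_{i+1}'] = []
--
--     for i, location in enumerate(task_locations):
--         vehicle = f'Vehicle_{i % fleet_size + 1}'
--         routes[vehicle].append(location)
--
--     return routes
-- ===== SOURCE B (Python) =====
-- def simple_route_generation(fleet_size):
--     task_locations = ['Seoul', 'Busan', 'Incheon', 'Daegu', 'Daejeon', 'Gwangju', 'Ulsan', 'Suwon', 'Changwon', 'Seongnam', 'Goyang', 'Anyang', 'Yongin', 'Jeonju', 'Cheongju', 'Chuncheon', 'Gangneung', 'Jeju', 'Gimpo', 'Pohang', 'Ansan', 'Wonju', 'Guri', 'Gimhae', 'Yangju', 'Bucheon', 'Asan', 'Gunsan', 'Gyeongju', 'Iksan', 'Mokpo', 'Suncheon', 'Yeosu', 'Jecheon', 'Hwaseong', 'Gwangmyeong', 'Pyeongtaek', 'Uijeongbu', 'Cheonan', 'Andong', 'Gimcheon', 'Gyeongsan', 'Pocheon', 'Gwacheon', 'Naju', 'Gimje', 'Miryang', 'Hwado']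
--
--     def every(lst):
--         # recursive stride extraction: first element, then every fleet_size-th after it
--         if not lst:
--             return []
--         return [lst[0]] + every(lst[fleet_size:])
--
--     return {f'Vehicle_{v + 1}': every(task_locations[v:]) for v in range(fleet_size)}
-- ===== Notes on version B (the rewrite author's own statement) =====
-- stated objective: alternative
-- what changed: Replaces A's two imperative dict passes (pre-seed empty buckets, then mutate the bucket chosen by modular indexing for each location) with one pure pass over vehicles, each bucket extracted from the location list by a recursive stride walk over suffix slices (lst[0] then recurse on lst[fleet_size:]).
-- outside the precondition, e.g. on simple_route_generation(0): A raises ZeroDivisionError, B returns {}; on simple_route_generation(-2): A raises KeyError, B returns {}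
import Mathlib
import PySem

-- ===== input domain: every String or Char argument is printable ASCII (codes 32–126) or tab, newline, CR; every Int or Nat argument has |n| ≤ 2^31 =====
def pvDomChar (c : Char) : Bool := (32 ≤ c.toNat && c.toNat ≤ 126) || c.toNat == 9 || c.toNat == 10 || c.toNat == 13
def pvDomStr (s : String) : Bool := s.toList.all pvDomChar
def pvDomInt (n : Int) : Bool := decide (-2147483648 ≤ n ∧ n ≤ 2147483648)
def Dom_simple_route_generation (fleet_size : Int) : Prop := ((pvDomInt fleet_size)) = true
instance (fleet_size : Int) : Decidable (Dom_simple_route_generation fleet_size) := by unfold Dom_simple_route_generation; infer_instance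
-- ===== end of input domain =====

-- B replaces A's two imperative dict passes (seed empty buckets, then mutate the bucket picked by
-- modular indexing per location) with one pure pass over vehicles, each bucket extracted by a
-- recursive stride walk over suffix slices (objective: alternative; not faster).

-- shared constant: the fixed task-location list both Pythons contain literally
def pvTaskLocations : List String := ["Seoul", "Busan", "Incheon", "Daegu", "Daejeon", "Gwangju", "Ulsan", "Suwon", "Changwon", "Seongnam", "Goyang", "Anyang", "Yongin", "Jeonju", "Cheongju", "Chuncheon", "Gangneung", "Jeju", "Gimpo", "Pohang", "Ansan", "Wonju", "Guri", "Gimhae", "Yangju", "Bucheon", "Asan", "Gunsan", "Gyeongju", "Iksan", "Mokpo", "Suncheon", "Yeosu", "Jecheon", "Hwaseong", "Gwangmyeong", "Pyeongtaek", "Uijeongbu", "Cheonan", "Andong", "Gimcheon", "Gyeongsan", "Pocheon", "Gwacheon", "Naju", "Gimje", "Miryang", "Hwado"]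

-- f'Vehicle_{i+1}' (both Pythons build this same string)
def pvVehKey (i : Int) : String := String.ofList ("Vehicle_".toList ++ PySem.Int.toChars (i + 1))

-- ===== PORT A =====
def simple_route_generation (fleet_size : Int) : List (String × List String) :=
  let routes0 : PySem.Dict String (List String) :=
    (PySem.List.pyRange 0 fleet_size 1).foldl (fun d i => d.insert (pvVehKey i) []) PySem.Dict.empty
  let routes :=
    (PySem.List.enumerate pvTaskLocations).foldl
      (fun d p => d.modify (pvVehKey (PySem.Int.mod p.1 fleet_size)) [] (· ++ [p.2])) routes0
  routes.items

-- ===== PORT B =====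
-- B's helper 'every(lst)': [] if lst empty, else lst[0] followed by every(lst[fleet_size:]).
-- The Nat fuel is only a termination device; the initial fuel (length of the full list) is
-- never exhausted for fleet_size ≥ 1, so this is B's recursion step for step.
def pvEvery (f : Int) : Nat → List String → List String
  | _, [] => []
  | 0, _ :: _ => []
  | n + 1, x :: rest => x :: pvEvery f n (PySem.List.slice (x :: rest) (some f) none)

def simple_route_generation_alt (fleet_size : Int) : List (String × List String) :=
  (PySem.List.pyRange 0 fleet_size 1).map (fun v =>
    (pvVehKey v,
     pvEvery fleet_size pvTaskLocations.length (PySem.List.slice pvTaskLocations (some v) none)))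

-- ===== PRECONDITION & SPEC =====
-- Python A raises for fleet_size ≤ 0 (ZeroDivisionError at 0, KeyError for negatives)
def Pre_simple_route_generation (fleet_size : Int) : Prop := 1 ≤ fleet_size
instance (fleet_size : Int) : Decidable (Pre_simple_route_generation fleet_size) := by unfold Pre_simple_route_generation; infer_instance
def pvWitness_simple_route_generation : Int := 3

def Spec_simple_route_generation (fleet_size : Int) (out : List (String × List String)) : Prop := out = simple_route_generation_alt fleet_size
instance (fleet_size : Int) (out : List (String × List String)) : Decidable (Spec_simple_route_generation fleet_size out) := by unfold Spec_simple_route_generation; infer_instance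

-- ===== CLAIM (what is proved, stated in full; the proofs are below) =====
def Claim_equal_simple_route_generation : Prop := ∀ (fleet_size : Int), Dom_simple_route_generation fleet_size → Pre_simple_route_generation fleet_size → Spec_simple_route_generation fleet_size (simple_route_generation fleet_size)

-- ===== LEMMAS AND PROOFS =====

def pvRep (n : Nat) : List Char :=
  if _h : n < 10 then [Nat.digitChar n]
  else pvRep (n / 10) ++ [Nat.digitChar (n % 10)]
decreasing_by exact Nat.div_lt_self (by omega) (by omega)

lemma pvRep_lt {n : Nat} (h : n < 10) : pvRep n = [Nat.digitChar n] := by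
  rw [pvRep]; simp [h]

lemma pvRep_ge {n : Nat} (h : ¬ n < 10) : pvRep n = pvRep (n / 10) ++ [Nat.digitChar (n % 10)] := by
  rw [pvRep]; simp [h]

lemma pvRep_ne_nil (n : Nat) : pvRep n ≠ [] := by
  by_cases h : n < 10
  · rw [pvRep_lt h]; simp
  · rw [pvRep_ge h]; simp

lemma pvDigitChar_inj {a b : Nat} (ha : a < 10) (hb : b < 10)
    (h : Nat.digitChar a = Nat.digitChar b) : a = b := by
  interval_cases a <;> interval_cases b <;> first | rfl | exact absurd h (by decide)

lemma pvToDigitsCore_spec : ∀ (fuel n : Nat) (acc : List Char), n < fuel →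
    Nat.toDigitsCore 10 fuel n acc = pvRep n ++ acc := by
  intro fuel
  induction fuel with
  | zero => omega
  | succ fuel ih =>
    intro n acc hn
    rw [Nat.toDigitsCore]
    by_cases h10 : n < 10
    · have hz : n / 10 = 0 := Nat.div_eq_of_lt h10
      simp only [hz, reduceIte]
      rw [pvRep_lt h10, Nat.mod_eq_of_lt h10]
      simp
    · have hd : n / 10 ≠ 0 := by omega
      simp only [if_neg hd]
      rw [ih (n / 10) _ (by omega), pvRep_ge h10]
      simp

lemma pvRep_inj : ∀ (m n : Nat), pvRep m = pvRep n → m = n := by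
  intro m
  induction m using Nat.strong_induction_on with
  | _ m ih =>
    intro n h
    by_cases hm : m < 10 <;> by_cases hn : n < 10
    · rw [pvRep_lt hm, pvRep_lt hn] at h
      simp only [List.cons.injEq, and_true] at h
      exact pvDigitChar_inj hm hn h
    · rw [pvRep_lt hm, pvRep_ge hn] at h
      have hlen := congrArg List.length h
      simp [List.length_append] at hlen
      exact absurd hlen (pvRep_ne_nil (n / 10))
    · rw [pvRep_ge hm, pvRep_lt hn] at h
      have hlen := congrArg List.length h
      simp [List.length_append] at hlen
      exact absurd hlen (pvRep_ne_nil (m / 10))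
    · rw [pvRep_ge hm, pvRep_ge hn] at h
      obtain ⟨h1, h2⟩ := List.append_inj' h (by simp)
      have e1 : m / 10 = n / 10 := ih (m / 10) (Nat.div_lt_self (by omega) (by omega)) _ h1
      simp only [List.cons.injEq, and_true] at h2
      have e2 : m % 10 = n % 10 :=
        pvDigitChar_inj (Nat.mod_lt _ (by omega)) (Nat.mod_lt _ (by omega)) h2
      omega

lemma pvToChars_inj_nonneg (a b : Int) (ha : 0 ≤ a) (hb : 0 ≤ b)
    (h : PySem.Int.toChars a = PySem.Int.toChars b) : a = b := by
  unfold PySem.Int.toChars at h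
  rw [if_neg (by omega), if_neg (by omega)] at h
  unfold Nat.toDigits at h
  rw [pvToDigitsCore_spec _ _ _ (by omega), pvToDigitsCore_spec _ _ _ (by omega)] at h
  simp only [List.append_nil] at h
  have := pvRep_inj _ _ h
  omega

lemma pvVehKey_inj (a b : Int) (ha : 0 ≤ a) (hb : 0 ≤ b) (h : pvVehKey a = pvVehKey b) : a = b := by
  unfold pvVehKey at h
  have h2 := List.append_cancel_left (String.ofList_inj.mp h)
  have := pvToChars_inj_nonneg (a + 1) (b + 1) (by omega) (by omega) h2
  omega

set_option maxRecDepth 8192 in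
lemma pvA_items (f : Int) (hf : 1 ≤ f) :
    simple_route_generation f = (PySem.List.pyRange 0 f 1).map (fun v =>
      (pvVehKey v,
       ((PySem.List.enumerate pvTaskLocations).filter
          (fun p => pvVehKey (PySem.Int.mod p.1 f) == pvVehKey v)).map (fun p => p.2))) := by
  unfold simple_route_generation
  simp only []
  set R := PySem.List.pyRange 0 f 1 with hR
  set routes0 : PySem.Dict String (List String) :=
    R.foldl (fun d i => d.insert (pvVehKey i) []) PySem.Dict.empty with h0def
  set E := PySem.List.enumerate pvTaskLocations with hE
  set D := E.foldl
      (fun d p => d.modify (pvVehKey (PySem.Int.mod p.1 f)) [] (· ++ [p.2])) routes0 with hDdef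
  have hmemR : ∀ v ∈ R, 0 ≤ v ∧ v < f := fun v hv => PySem.List.mem_pyRange_one.mp hv
  have hinjR : (R.map pvVehKey).Nodup := by
    refine List.Nodup.map_on ?_ (PySem.List.nodup_pyRange_one 0 f)
    intro x hx y hy hxy
    exact pvVehKey_inj x y (hmemR x hx).1 (hmemR y hy).1 hxy
  have hitems0 : routes0.items = R.map (fun i => (pvVehKey i, ([] : List String))) := by
    rw [h0def, PySem.Dict.items_foldl_insert_fresh R pvVehKey (fun _ => []) PySem.Dict.empty (by intro a _; rfl) hinjR]
    rfl
  have hkeys0 : routes0.keys = R.map pvVehKey := by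
    simp only [PySem.Dict.keys, hitems0, List.map_map]
    rfl
  have hnk0 : routes0.keys.Nodup := hkeys0 ▸ hinjR
  have hmodmem : ∀ p : Int × String, pvVehKey (PySem.Int.mod p.1 f) ∈ routes0.keys := by
    intro p
    rw [hkeys0]
    exact List.mem_map_of_mem (PySem.List.mem_pyRange_one.mpr
      ⟨PySem.Int.mod_nonneg _ (by omega), PySem.Int.mod_lt _ (by omega)⟩)
  have hkeysD : D.keys = routes0.keys := by
    rw [hDdef, PySem.Dict.keys_foldl_modify_key E (fun p => pvVehKey (PySem.Int.mod p.1 f)) [] (fun _ p => (· ++ [p.2])) routes0, PySem.Set.update_eq_append_filter]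
    rw [List.filter_eq_nil_iff.mpr, List.append_nil]
    intro x hx
    have hx' : x ∈ E.map (fun p => pvVehKey (PySem.Int.mod p.1 f)) := (PySem.Set.mem_ofList _ _).mp hx
    obtain ⟨p, _hp, rfl⟩ := List.mem_map.mp hx'
    simp
    exact hmodmem p
  have hndD : D.keys.Nodup :=
    PySem.Dict.nodup_keys_foldl_modify_key E (fun p => pvVehKey (PySem.Int.mod p.1 f)) [] (fun _ p => (· ++ [p.2])) routes0 hnk0
  rw [PySem.Dict.items_eq_map_keys D hndD [], hkeysD, hkeys0, List.map_map]
  apply List.map_congr_left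
  intro v hv
  simp only [Function.comp]
  rw [Prod.mk.injEq]
  refine ⟨rfl, ?_⟩
  have hD : D.getD (pvVehKey v) [] = routes0.getD (pvVehKey v) [] ++
      ((E.map (fun p => (pvVehKey (PySem.Int.mod p.1 f), p.2))).filter
        (fun p => p.1 == pvVehKey v)).map (fun p => p.2) := by
    rw [← PySem.Dict.getD_foldl_modify_append, List.foldl_map]
  have hmem : (pvVehKey v, ([] : List String)) ∈ routes0.items := by
    rw [hitems0]; exact List.mem_map_of_mem hv
  rw [hD, PySem.Dict.getD_of_mem_items routes0 hmem hnk0 [],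
      List.nil_append, List.filter_map, List.map_map]
  rfl

-- small-modulus identity: 0 ≤ s < f → s % f = s
lemma pvMod_small {s f : Int} (h0 : 0 ≤ s) (h : s < f) : PySem.Int.mod s f = s := by
  simp [PySem.Int.mod, Int.fmod_eq_emod]
  rw [if_pos (Or.inl (by omega)), Int.emod_eq_of_lt h0 h]
  ring

lemma pvMod_shift (p1 f : Int) : PySem.Int.mod (p1 + f) f = PySem.Int.mod p1 f := by
  simp [PySem.Int.mod, Int.add_fmod_right]

lemma pvEnum_shift (t : Int) : ∀ (ys : List String) (s : Int),
    PySem.List.enumerate ys (s + t) = (PySem.List.enumerate ys s).map (fun p => (p.1 + t, p.2)) := by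
  intro ys
  induction ys with
  | nil => intro s; simp [PySem.List.enumerate_nil]
  | cons y ys ih =>
    intro s
    rw [PySem.List.enumerate_cons, PySem.List.enumerate_cons, List.map_cons,
        show s + t + 1 = (s + 1) + t by ring, ih (s + 1)]

-- over a block of fresh indices all below f, the filter hits at most once: index v exactly
lemma pvOne_hit (f v : Int) :
    ∀ (ys : List String) (s : Int), 0 ≤ s → s + (ys.length : Int) ≤ f →
    (((PySem.List.enumerate ys s).filter (fun p => PySem.Int.mod p.1 f == v)).map (fun p => p.2)) =
      (if v < s then [] else (ys.drop (v - s).toNat).take 1) := by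
  intro ys
  induction ys with
  | nil =>
    intro s _ _
    simp [PySem.List.enumerate_nil]
  | cons y ys ih =>
    intro s hs hle
    have hsf : s < f := by simp at hle; omega
    rw [PySem.List.enumerate_cons, List.filter_cons]
    have hmod : PySem.Int.mod s f = s := pvMod_small hs hsf
    by_cases hsv : s = v
    · rw [if_pos (by rw [hmod]; simp [hsv])]
      rw [List.map_cons, ih (s + 1) (by omega) (by simp at hle ⊢; omega)]
      rw [if_pos (by omega), if_neg (by omega)]
      have : (v - s).toNat = 0 := by omega
      simp [this]
    · rw [if_neg (by rw [hmod]; simp [hsv])]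
      rw [ih (s + 1) (by omega) (by simp at hle ⊢; omega)]
      by_cases hvlt : v < s
      · rw [if_pos (by omega), if_pos hvlt]
      · rw [if_neg (by omega), if_neg hvlt]
        have : (v - s).toNat = (v - (s + 1)).toNat + 1 := by omega
        rw [this, List.drop_succ_cons]

-- B's recursive stride walk computes exactly the modular-index filter of A
lemma pvStride (f : Int) (hf : 1 ≤ f) :
    ∀ (n : Nat) (xs : List String) (v : Int), 0 ≤ v → v < f → xs.length ≤ n →
    pvEvery f n (xs.drop v.toNat) =
      (((PySem.List.enumerate xs 0).filter (fun p => PySem.Int.mod p.1 f == v)).map (fun p => p.2)) := by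
  intro n
  induction n with
  | zero =>
    intro xs v _ _ hlen
    have hx : xs = [] := List.eq_nil_of_length_eq_zero (by omega)
    subst hx
    simp [pvEvery, PySem.List.enumerate_nil]
  | succ n ih =>
    intro xs v hv0 hvf hlen
    by_cases hbig : xs.length ≤ v.toNat
    · have hdrop : xs.drop v.toNat = [] := List.drop_eq_nil_of_le hbig
      rw [hdrop,
          pvOne_hit f v xs 0 (by omega) (by push_cast; omega),
          if_neg (by omega)]
      simp [hdrop, pvEvery]
    · push_neg at hbig
      -- split xs into its first fleet_size elements and the rest
      conv_rhs => rw [show xs = xs.take f.toNat ++ xs.drop f.toNat from (List.take_append_drop _ _).symm]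
      rw [PySem.List.enumerate_append, List.filter_append, List.map_append]
      have hlen1 : (0 : Int) + ((xs.take f.toNat).length : Int) ≤ f := by
        rw [List.length_take]; push_cast; omega
      rw [pvOne_hit f v (xs.take f.toNat) 0 le_rfl hlen1, if_neg (by omega)]
      have hpart1 : ((xs.take f.toNat).drop (v - 0).toNat).take 1 = (xs.drop v.toNat).take 1 := by
        rw [show (v - 0).toNat = v.toNat by omega, List.drop_take, List.take_take]
        congr 1
        omega
      rw [hpart1]
      -- head of the stride exists
      obtain ⟨x, rest, hx⟩ : ∃ x rest, xs.drop v.toNat = x :: rest := by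
        cases h : xs.drop v.toNat with
        | nil => exact absurd (by simpa using congrArg List.length h) (by omega)
        | cons a l => exact ⟨a, l, rfl⟩
      rw [hx]
      show x :: pvEvery f n (PySem.List.slice (x :: rest) (some f) none) = _
      have hsl : PySem.List.slice (x :: rest) (some f) none = (x :: rest).drop f.toNat :=
        PySem.List.slice_from _ (by omega)
      have hdd : List.drop f.toNat (List.drop v.toNat xs) = List.drop v.toNat (List.drop f.toNat xs) := by
        rw [List.drop_drop, List.drop_drop, Nat.add_comm]
      rw [hsl, ← hx, hdd]
      by_cases hfl : xs.length ≤ f.toNat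
      · have hd2 : xs.drop f.toNat = [] := List.drop_eq_nil_of_le hfl
        rw [hd2]
        simp [PySem.List.enumerate_nil, pvEvery, hx]
      · push_neg at hfl
        have htl : (0 : Int) + ((xs.take f.toNat).length : Int) = 0 + f := by
          rw [List.length_take]; push_cast; omega
        rw [htl, pvEnum_shift f (xs.drop f.toNat) 0, List.filter_map, List.map_map]
        have hcondeq : (PySem.List.enumerate (xs.drop f.toNat) 0).filter
                 ((fun p => PySem.Int.mod p.1 f == v) ∘ fun p : Int × String => (p.1 + f, p.2)) =
               (PySem.List.enumerate (xs.drop f.toNat) 0).filter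
                 (fun p => PySem.Int.mod p.1 f == v) := by
          apply List.filter_congr
          intro p _
          simp [Function.comp, pvMod_shift]
        rw [hcondeq,
            ih (xs.drop f.toNat) v hv0 hvf (by simp [List.length_drop]; omega)]
        simp [hx, Function.comp]

-- ===== VERDICT (by name: the statement is the Claim_ definition above) =====
theorem simple_route_generation_spec : Claim_equal_simple_route_generation := by
  intro f _hd hf
  unfold Spec_simple_route_generation simple_route_generation_alt
  rw [pvA_items f hf]
  apply List.map_congr_left
  intro v hv
  have hv' := (PySem.List.mem_pyRange_one).mp hv
  congr 1
  have hsl : PySem.List.slice pvTaskLocations (some v) none = pvTaskLocations.drop v.toNat :=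
    PySem.List.slice_from _ hv'.1
  rw [hsl, pvStride f hf pvTaskLocations.length pvTaskLocations v hv'.1 hv'.2 le_rfl]
  apply congrArg
  apply List.filter_congr
  intro p _hp
  have hm0 : 0 ≤ PySem.Int.mod p.1 f := PySem.Int.mod_nonneg _ (by omega)
  apply Bool.eq_iff_iff.mpr
  simp only [beq_iff_eq]
  exact ⟨pvVehKey_inj _ _ hm0 hv'.1, fun h => by rw [h]⟩
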